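-- pv_equiv track=rewrite | github.com/MrBrantCode/unitest_baseline | mut_generate/mist_train_cf/cf_90695/solution.py | replace_substring
-- ===== SOURCE A (Python) =====
-- def replace_substring(string, substring, replacement):
--     modified_string = ""
--     replacements_made = 0
--
--     if substring == "":
--         return string, replacements_made
--
--     string_lower = string.lower()
--     substring_lower = substring.lower()
--
--     i = 0
--     while i < len(string):
--         if string_lower[i:i+len(substring)] == substring_lower:
--             modified_string += replacement
--             replacements_made += 1
--             i += len(substring)
--         else:
--             modified_string += string[i]
--             i += 1
--
--     return modified_string, replacements_made
-- ===== SOURCE B (Python) =====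
-- def replace_substring(string, substring, replacement):
--     if substring == "":
--         return string, 0
--     string_lower = string.lower()
--     substring_lower = substring.lower()
--     m = len(substring)
--     pieces = []
--     count = 0
--     i = 0
--     while True:
--         j = string_lower.find(substring_lower, i)
--         if j == -1:
--             pieces.append(string[i:])
--             break
--         pieces.append(string[i:j])
--         pieces.append(replacement)
--         count += 1
--         i = j + m
--     return "".join(pieces), count
-- ===== Notes on version B (the rewrite author's own statement) =====
-- stated objective: faster
-- what changed: B jumps between matches with str.find on the lowercased string and assembles the result from slices with one list-join, instead of A's char-by-char index loop with repeated string concatenation.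
import Mathlib
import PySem

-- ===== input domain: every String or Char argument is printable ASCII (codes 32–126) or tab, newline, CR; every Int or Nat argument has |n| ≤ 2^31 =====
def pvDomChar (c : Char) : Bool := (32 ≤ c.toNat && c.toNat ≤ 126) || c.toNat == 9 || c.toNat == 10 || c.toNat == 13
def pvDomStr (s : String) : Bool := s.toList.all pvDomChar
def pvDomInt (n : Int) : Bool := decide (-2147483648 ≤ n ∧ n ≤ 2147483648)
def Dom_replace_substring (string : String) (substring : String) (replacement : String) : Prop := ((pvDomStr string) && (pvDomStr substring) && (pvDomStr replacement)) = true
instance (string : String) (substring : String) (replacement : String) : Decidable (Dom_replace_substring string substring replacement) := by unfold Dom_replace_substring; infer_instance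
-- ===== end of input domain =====

-- B replaces A's char-by-char loop with string concatenation by find-based jumps between
-- matches, collecting slices into a list joined once (objective: faster, constant-factor).


-- ===== PORT A =====
-- A's while loop: i scans the string; at each i it compares string_lower[i:i+m] with
-- substring_lower, appending replacement (and jumping m) or the single char string[i].
-- fuel = number of remaining loop iterations (≤ s.length since i grows each iteration).
def pvGoA (s sl subl repl : List Char) (m : Nat) : Nat → Nat → List Char → Int → List Char × Int
  | 0, _, acc, cnt => (acc, cnt)
  | fuel+1, i, acc, cnt =>
    if h : i < s.length then
      if PySem.List.slice sl (some (i : Int)) (some ((i : Int) + (m : Int))) = subl then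
        pvGoA s sl subl repl m fuel (i + m) (acc ++ repl) (cnt + 1)
      else
        pvGoA s sl subl repl m fuel (i + 1) (acc ++ [s[i]]) cnt
    else (acc, cnt)

def replace_substring (string : String) (substring : String) (replacement : String) : String × Int :=
  if substring.toList = [] then (string, 0)
  else
    let s := string.toList
    let sl := PySem.Chars.lower s
    let subl := PySem.Chars.lower substring.toList
    let r := pvGoA s sl subl replacement.toList substring.toList.length s.length 0 [] 0
    (String.ofList r.1, r.2)

-- ===== PORT B =====
-- B's while True loop: find the next case-insensitive occurrence from i, append the
-- slice up to it and the replacement; on -1 append the tail and stop; join at the end.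
def pvGoB (s sl subl repl : List Char) (m : Nat) : Nat → Nat → List (List Char) → Int → List (List Char) × Int
  | 0, _, pieces, cnt => (pieces, cnt)
  | fuel+1, i, pieces, cnt =>
    let j := PySem.Chars.findFrom sl subl (i : Int) none
    if j = -1 then (pieces ++ [PySem.List.slice s (some (i : Int)) none], cnt)
    else pvGoB s sl subl repl m fuel (j.toNat + m)
           (pieces ++ [PySem.List.slice s (some (i : Int)) (some j)] ++ [repl]) (cnt + 1)

def replace_substring_alt (string : String) (substring : String) (replacement : String) : String × Int :=
  if substring.toList = [] then (string, 0)
  else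
    let s := string.toList
    let sl := PySem.Chars.lower s
    let subl := PySem.Chars.lower substring.toList
    let r := pvGoB s sl subl replacement.toList substring.toList.length (s.length + 1) 0 [] 0
    (String.ofList (PySem.Chars.join [] r.1), r.2)

-- ===== PRECONDITION & SPEC =====
def Spec_replace_substring (string : String) (substring : String) (replacement : String) (out : String × Int) : Prop := out = replace_substring_alt string substring replacement
instance (string : String) (substring : String) (replacement : String) (out : String × Int) : Decidable (Spec_replace_substring string substring replacement out) := by unfold Spec_replace_substring; infer_instance

-- ===== CLAIM (what is proved, stated in full; the proofs are below) =====
def Claim_equal_replace_substring : Prop := ∀ (string : String) (substring : String) (replacement : String), Dom_replace_substring string substring replacement → Spec_replace_substring string substring replacement (replace_substring string substring replacement)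

-- ===== LEMMAS AND PROOFS =====

-- "".join over a piece list is flatten
theorem pv_join_nil (ps : List (List Char)) : PySem.Chars.join [] ps = ps.flatten := by
  simp [PySem.Chars.join, List.intercalate]
  induction ps with
  | nil => simp
  | cons h t ih => cases t <;> simp_all [List.intersperse]

-- A's slice comparison is a prefix test
theorem pv_match_iff (sl subl : List Char) (m i : Nat) (hm : subl.length = m) :
    (PySem.List.slice sl (some (i : Int)) (some ((i : Int) + (m : Int))) = subl) ↔
      subl <+: sl.drop i := by
  rw [PySem.List.slice_natCast_add, List.prefix_iff_eq_take, hm]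
  constructor <;> (intro h; exact h.symm)

-- the fuel is irrelevant once it covers the remaining positions
theorem pv_fuel (s sl subl repl : List Char) (m : Nat) (hm1 : 1 ≤ m) :
    ∀ fuel₁ fuel₂ i acc cnt, s.length - i ≤ fuel₁ → s.length - i ≤ fuel₂ →
      pvGoA s sl subl repl m fuel₁ i acc cnt = pvGoA s sl subl repl m fuel₂ i acc cnt := by
  intro fuel₁
  induction fuel₁ with
  | zero =>
    intro fuel₂ i acc cnt h1 _
    cases fuel₂ with
    | zero => rfl
    | succ f => simp [pvGoA]; intro h; omega
  | succ f ih =>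
    intro fuel₂ i acc cnt h1 h2
    by_cases hi : i < s.length
    · cases fuel₂ with
      | zero => omega
      | succ f₂ =>
        simp only [pvGoA, dif_pos hi]
        split
        · exact ih f₂ (i + m) _ _ (by omega) (by omega)
        · exact ih f₂ (i + 1) _ _ (by omega) (by omega)
    · cases fuel₂ with
      | zero => simp [pvGoA, dif_neg hi]
      | succ f₂ => simp [pvGoA, dif_neg hi]

-- one loop step of A, at the canonical fuel s.length
theorem pv_step_match (s sl subl repl : List Char) (m : Nat) (hm : subl.length = m) (hm1 : 1 ≤ m)
    {i : Nat} (hi : i < s.length) (hp : subl <+: sl.drop i) (acc : List Char) (cnt : Int) :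
    pvGoA s sl subl repl m s.length i acc cnt =
      pvGoA s sl subl repl m s.length (i + m) (acc ++ repl) (cnt + 1) := by
  obtain ⟨f, hf⟩ : ∃ f, s.length = f + 1 := ⟨s.length - 1, by omega⟩
  conv_lhs => rw [hf]
  simp only [pvGoA, dif_pos hi, if_pos ((pv_match_iff sl subl m i hm).2 hp)]
  exact pv_fuel s sl subl repl m hm1 f s.length (i + m) _ _ (by omega) (by omega)

theorem pv_step_nomatch (s sl subl repl : List Char) (m : Nat) (hm : subl.length = m) (hm1 : 1 ≤ m)
    {i : Nat} (hi : i < s.length) (hp : ¬ subl <+: sl.drop i) (acc : List Char) (cnt : Int) :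
    pvGoA s sl subl repl m s.length i acc cnt =
      pvGoA s sl subl repl m s.length (i + 1) (acc ++ [s[i]]) cnt := by
  obtain ⟨f, hf⟩ : ∃ f, s.length = f + 1 := ⟨s.length - 1, by omega⟩
  conv_lhs => rw [hf]
  simp only [pvGoA, dif_pos hi, if_neg (fun h => hp ((pv_match_iff sl subl m i hm).1 h))]
  exact pv_fuel s sl subl repl m hm1 f s.length (i + 1) _ _ (by omega) (by omega)

-- when no occurrence remains, A copies the tail
theorem pv_nomore (s sl subl repl : List Char) (m : Nat) (hm : subl.length = m) :
    ∀ fuel i acc cnt, s.length - i ≤ fuel → (∀ k, i ≤ k → ¬ subl <+: sl.drop k) →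
      pvGoA s sl subl repl m fuel i acc cnt = (acc ++ s.drop i, cnt) := by
  intro fuel
  induction fuel with
  | zero =>
    intro i acc cnt h1 _
    have : s.drop i = [] := List.drop_eq_nil_of_le (by omega)
    simp [pvGoA, this]
  | succ f ih =>
    intro i acc cnt h1 hno
    by_cases hi : i < s.length
    · simp only [pvGoA, dif_pos hi,
        if_neg (fun h => hno i le_rfl ((pv_match_iff sl subl m i hm).1 h))]
      rw [ih (i + 1) _ _ (by omega) (fun k hk => hno k (by omega))]
      rw [List.drop_eq_getElem_cons hi]
      simp
    · have : s.drop i = [] := List.drop_eq_nil_of_le (by omega)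
      simp [pvGoA, dif_neg hi, this]

-- A run from i up to the first occurrence at i+d consumes the segment and the match
theorem pv_skip (s sl subl repl : List Char) (m : Nat) (hm : subl.length = m) (hm1 : 1 ≤ m) :
    ∀ d i acc cnt, (∀ k, i ≤ k → k < i + d → ¬ subl <+: sl.drop k) →
      subl <+: sl.drop (i + d) → i + d + m ≤ s.length →
      pvGoA s sl subl repl m s.length i acc cnt =
        pvGoA s sl subl repl m s.length (i + d + m) (acc ++ (s.drop i).take d ++ repl) (cnt + 1) := by
  intro d
  induction d with
  | zero =>
    intro i acc cnt _ hp hb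
    simpa using pv_step_match s sl subl repl m hm hm1 (by omega) (by simpa using hp) acc cnt
  | succ d ih =>
    intro i acc cnt hno hp hb
    have hi : i < s.length := by omega
    rw [pv_step_nomatch s sl subl repl m hm hm1 hi (hno i le_rfl (by omega)) acc cnt]
    have h1 : i + 1 + d = i + (d + 1) := by omega
    rw [ih (i + 1) (acc ++ [s[i]]) cnt (fun k hk hk2 => hno k (by omega) (by omega))
      (by rw [h1]; exact hp) (by omega)]
    rw [h1]
    congr 1
    rw [List.drop_eq_getElem_cons hi, List.take_succ_cons]
    simp

-- A's accumulator splits off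
theorem pv_acc (s sl subl repl : List Char) (m : Nat) :
    ∀ fuel i acc cnt, pvGoA s sl subl repl m fuel i acc cnt =
      (acc ++ (pvGoA s sl subl repl m fuel i [] 0).1,
       cnt + (pvGoA s sl subl repl m fuel i [] 0).2) := by
  intro fuel
  induction fuel with
  | zero => intro i acc cnt; simp [pvGoA]
  | succ f ih =>
    intro i acc cnt
    by_cases hi : i < s.length
    · simp only [pvGoA, dif_pos hi]
      split
      · rw [ih (i + m) (acc ++ repl) (cnt + 1), ih (i + m) ([] ++ repl) (0 + 1)]
        simp [List.append_assoc]; ring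
      · rw [ih (i + 1) (acc ++ [s[i]]) cnt, ih (i + 1) ([] ++ [s[i]]) 0]
        simp [List.append_assoc]
    · simp [pvGoA, dif_neg hi]

-- there is an occurrence at some k ≥ i  ↔  subl is an infix of sl.drop i
theorem pv_infix_iff (sl subl : List Char) (i : Nat) :
    (∃ k, i ≤ k ∧ subl <+: sl.drop k) ↔ subl <:+: sl.drop i := by
  rw [← PySem.Chars.isIn_iff_infix, ← PySem.Chars.exists_prefix_drop_iff_isIn]
  constructor
  · rintro ⟨k, hik, hp⟩
    refine ⟨k - i, ?_⟩
    rw [List.drop_drop]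
    have hk : i + (k - i) = k := by omega
    rwa [hk]
  · rintro ⟨j, hp⟩
    refine ⟨i + j, by omega, ?_⟩
    rw [List.drop_drop] at hp
    exact hp

-- the main correspondence: B's loop from i equals A's loop from i
theorem pv_main (s sl subl repl : List Char) (m : Nat)
    (hlen : sl.length = s.length) (hm : subl.length = m) (hm1 : 1 ≤ m) :
    ∀ fuel i pieces cnt, i ≤ s.length → s.length - i < fuel →
      (PySem.Chars.join [] (pvGoB s sl subl repl m fuel i pieces cnt).1,
        (pvGoB s sl subl repl m fuel i pieces cnt).2) =
      (PySem.Chars.join [] pieces ++ (pvGoA s sl subl repl m s.length i [] 0).1,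
        cnt + (pvGoA s sl subl repl m s.length i [] 0).2) := by
  intro fuel
  induction fuel with
  | zero => intro i pieces cnt h1 h2; omega
  | succ f ih =>
    intro i pieces cnt h1 h2
    by_cases hj : PySem.Chars.findFrom sl subl (i : Int) none = -1
    · have hno : ∀ k, i ≤ k → ¬ subl <+: sl.drop k := by
        intro k hk hp
        have : subl <:+: sl.drop i := (pv_infix_iff sl subl i).1 ⟨k, hk, hp⟩
        exact (PySem.Chars.findFrom_natCast_eq_neg_one_iff sl subl i (by omega)).1 hj this
      rw [pv_nomore s sl subl repl m hm s.length i [] 0 (by omega) hno]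
      simp only [pvGoB, hj]
      rw [pv_join_nil, pv_join_nil]
      simp [PySem.List.slice_from_natCast]
    · have hspec := PySem.Chars.findFrom_natCast_spec sl subl i (by omega) hj
      set j : Int := PySem.Chars.findFrom sl subl (i : Int) none with hjdef
      obtain ⟨hij, hpre, hmin⟩ := hspec
      have hjlen : j.toNat + m ≤ s.length := by
        have := hpre.length_le
        simp [List.length_drop, hm] at this
        omega
      have hid : j.toNat = i + (j.toNat - i) := by omega
      -- A side: skip to the occurrence, then recurse
      rw [pv_skip s sl subl repl m hm hm1 (j.toNat - i) i [] 0
        (fun k hk hk2 => hmin k hk (by omega)) (by rw [← hid]; exact hpre) (by omega)]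
      rw [pv_acc s sl subl repl m s.length (i + (j.toNat - i) + m) _ _]
      -- B side: one step, then IH
      simp only [pvGoB]
      rw [← hjdef, if_neg hj]
      rw [ih (j.toNat + m) _ (cnt + 1) (by omega) (by omega)]
      rw [pv_join_nil, pv_join_nil]
      have hslice : PySem.List.slice s (some (i : Int)) (some j) = (s.drop i).take (j.toNat - i) := by
        rw [PySem.List.slice_toNat s (by omega) (by omega)]
        simp
      simp [hslice, ← hid, List.append_assoc]
      ring
  
-- ===== VERDICT (by name: the statement is the Claim_ definition above) =====
theorem replace_substring_spec : Claim_equal_replace_substring := by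
  intro string substring replacement _
  unfold Spec_replace_substring replace_substring replace_substring_alt
  by_cases hsub : substring.toList = []
  · simp [hsub]
  · simp only [if_neg hsub]
    have hm1 : 1 ≤ substring.toList.length := List.length_pos_of_ne_nil hsub
    have hlen : (PySem.Chars.lower string.toList).length = string.toList.length := by
      simp [PySem.Chars.lower]
    have hm : (PySem.Chars.lower substring.toList).length = substring.toList.length := by
      simp [PySem.Chars.lower]
    have h := pv_main string.toList (PySem.Chars.lower string.toList)
      (PySem.Chars.lower substring.toList) replacement.toList substring.toList.length
      hlen hm hm1 (string.toList.length + 1) 0 [] 0 (by omega) (by omega)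
    simp only [pv_join_nil, List.flatten_nil, List.nil_append, zero_add] at h
    simp only [pv_join_nil]
    rw [Prod.ext_iff] at h ⊢
    exact ⟨congrArg String.ofList h.1.symm, h.2.symm⟩
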